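-- pv_equiv track=rewrite | github.com/aorangehc/Daily-coding | 字节豆包MarsCode-青训营-寒假专场/codes/Python/找出最长的神奇数列.py | solution
-- ===== SOURCE A (Python) =====
-- def solution(inp):
--     max_len = 0
--     max_str = ''
--
--     for i in range(len(inp)):
--         temp = '1' if inp[i] == '0' else '0'
--         cnt_len = 1
--         for j in range(i + 1, len(inp)):
--             if inp[j] != temp:
--                 break
--             temp = '1' if temp == '0' else '0'
--             cnt_len += 1
--         if cnt_len > max_len:
--             max_len = cnt_len
--             max_str = inp[i : i + cnt_len]
--     if max_len < 3:
--         max_str = ''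
--     return max_str
-- ===== SOURCE B (Python) =====
-- def solution(inp):
--     # Single pass over boundaries: a "run" extends while each next char equals
--     # ('1' if previous char == '0' else '0'); keep the first longest run.
--     n = len(inp)
--     best_len = 0
--     best_start = 0
--     start = 0
--     for j in range(1, n):
--         if inp[j] != ('1' if inp[j - 1] == '0' else '0'):
--             if j - start > best_len:
--                 best_len, best_start = j - start, start
--             start = j
--     if n - start > best_len:
--         best_len, best_start = n - start, start
--     return inp[best_start:best_start + best_len] if best_len >= 3 else ''
-- ===== Notes on version B (the rewrite author's own statement) =====
-- stated objective: faster
-- what changed: B replaces A's quadratic scan that regrows an alternating run from every index by a single linear pass over adjacent-pair boundaries, keeping the first longest maximal run.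
import Mathlib
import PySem

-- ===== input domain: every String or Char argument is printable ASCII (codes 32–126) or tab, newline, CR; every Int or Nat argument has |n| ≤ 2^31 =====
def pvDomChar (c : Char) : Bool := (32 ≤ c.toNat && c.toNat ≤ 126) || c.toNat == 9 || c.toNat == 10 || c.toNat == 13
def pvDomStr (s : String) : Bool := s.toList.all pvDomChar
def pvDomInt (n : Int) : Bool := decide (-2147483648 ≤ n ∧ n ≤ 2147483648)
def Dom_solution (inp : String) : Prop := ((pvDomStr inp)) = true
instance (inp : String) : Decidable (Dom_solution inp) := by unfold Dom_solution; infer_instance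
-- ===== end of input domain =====

-- B replaces A's quadratic restart-at-every-index scan by one linear pass over run
-- boundaries that keeps the first longest alternating run (objective: faster, O(n) vs O(n^2)).

-- ===== PORT A =====
-- helper: '1' if c == '0' else '0'
def aFlip (c : Char) : Char := if c = '0' then '1' else '0'

-- inner j-loop of A (with its break), over the remaining indices
def aInner (l : List Char) : List Nat → Char → Nat → Nat
  | [], _, cnt => cnt
  | j :: js, temp, cnt =>
    if l.getD j ' ' ≠ temp then cnt
    else aInner l js (aFlip temp) (cnt + 1)

-- body of A's outer for-loop: state = (max_len, max_str)
def aStep (l : List Char) (st : Nat × List Char) (i : Nat) : Nat × List Char :=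
  let temp := aFlip (l.getD i ' ')
  let cnt := aInner l (List.range' (i + 1) (l.length - (i + 1))) temp 1
  if cnt > st.1 then (cnt, PySem.List.slice l (some (i : Int)) (some ((i : Int) + (cnt : Int)))) else st

def solution (inp : String) : String :=
  let l := inp.toList
  let r := (List.range l.length).foldl (aStep l) (0, [])
  if r.1 < 3 then "" else String.ofList r.2

-- ===== PORT B =====
-- body of B's loop: state = (best_len, best_start, start)
def bStep (l : List Char) (st : Nat × Nat × Nat) (j : Nat) : Nat × Nat × Nat :=
  if l.getD j ' ' ≠ (if l.getD (j - 1) ' ' = '0' then '1' else '0') then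
    if j - st.2.2 > st.1 then (j - st.2.2, st.2.2, j) else (st.1, st.2.1, j)
  else st

def solution_alt (inp : String) : String :=
  let l := inp.toList
  let n := l.length
  let st := (List.range' 1 (n - 1)).foldl (bStep l) (0, 0, 0)
  let p := if n - st.2.2 > st.1 then (n - st.2.2, st.2.2) else (st.1, st.2.1)
  if p.1 ≥ 3 then String.ofList (PySem.List.slice l (some (p.2 : Int)) (some ((p.2 : Int) + (p.1 : Int)))) else ""

-- ===== PRECONDITION & SPEC =====
def Spec_solution (inp : String) (out : String) : Prop := out = solution_alt inp
instance (inp : String) (out : String) : Decidable (Spec_solution inp out) := by unfold Spec_solution; infer_instance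

-- ===== CLAIM (what is proved, stated in full; the proofs are below) =====
def Claim_equal_solution : Prop := ∀ (inp : String), Dom_solution inp → Spec_solution inp (solution inp)

-- ===== LEMMAS AND PROOFS =====

-- length of A's alternating run starting at i (for i < l.length); 0 irrelevant otherwise
def rlen (l : List Char) (i : Nat) : Nat :=
  if h : i + 1 < l.length ∧ l.getD (i + 1) ' ' = aFlip (l.getD i ' ') then
    rlen l (i + 1) + 1
  else 1
termination_by l.length - i
decreasing_by omega

-- chain count from j with expected char t
def crun (l : List Char) (j : Nat) (t : Char) : Nat :=
  if h : j < l.length ∧ l.getD j ' ' = t then crun l (j + 1) (aFlip t) + 1 else 0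
termination_by l.length - j
decreasing_by omega

-- reference computation over run starts
theorem rlen_pos (l : List Char) (i : Nat) : 1 ≤ rlen l i := by
  rw [rlen]; split <;> omega

def runBest (l : List Char) (i : Nat) (bl bs : Nat) : Nat × Nat :=
  if h : i < l.length then
    let r := rlen l i
    have hr : 1 ≤ r := rlen_pos l i
    if r > bl then runBest l (i + r) r i else runBest l (i + r) bl bs
  else (bl, bs)
termination_by l.length - i
decreasing_by all_goals omega

theorem aInner_eq (l : List Char) : ∀ d j t cnt, l.length - j = d → aInner l (List.range' j d) t cnt = cnt + crun l j t := by
  intro d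
  induction d with
  | zero =>
    intro j t cnt hd
    rw [crun, dif_neg (by omega)]
    simp [aInner, List.range']
  | succ d ih =>
    intro j t cnt hd
    have hj : j < l.length := by omega
    rw [show List.range' j (d + 1) = j :: List.range' (j + 1) d from rfl]
    rw [crun]
    by_cases hc : l.getD j ' ' = t
    · rw [dif_pos ⟨hj, hc⟩]
      simp only [aInner]
      rw [if_neg (not_not_intro hc)]
      rw [ih (j + 1) (aFlip t) (cnt + 1) (by omega)]
      omega
    · rw [dif_neg (by tauto)]
      simp only [aInner]
      rw [if_pos hc]
      omega

theorem rlen_eq_crun (l : List Char) : ∀ d i, l.length - i = d →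
    rlen l i = 1 + crun l (i + 1) (aFlip (l.getD i ' ')) := by
  intro d
  induction d with
  | zero =>
    intro i hd
    rw [rlen, dif_neg (by omega), crun, dif_neg (by omega)]
  | succ d ih =>
    intro i hd
    rw [rlen, crun]
    by_cases hc : i + 1 < l.length ∧ l.getD (i + 1) ' ' = aFlip (l.getD i ' ')
    · rw [dif_pos hc, dif_pos hc]
      rw [ih (i + 1) (by omega), hc.2]
      omega
    · rw [dif_neg hc, dif_neg hc]

theorem rlen_ge_two_iff (l : List Char) (i : Nat) :
    2 ≤ rlen l i ↔ (i + 1 < l.length ∧ l.getD (i + 1) ' ' = aFlip (l.getD i ' ')) := by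
  rw [rlen]
  split
  · rename_i h; have := rlen_pos l (i + 1); exact ⟨fun _ => h, fun _ => by omega⟩
  · rename_i h; exact ⟨fun h2 => by omega, fun h2 => absurd h2 h⟩

theorem rlen_succ_of (l : List Char) (i : Nat) (h : 2 ≤ rlen l i) :
    rlen l i = rlen l (i + 1) + 1 := by
  rw [rlen, dif_pos ((rlen_ge_two_iff l i).1 h)]

theorem run_at (l : List Char) : ∀ k i, k < rlen l i → rlen l (i + k) = rlen l i - k := by
  intro k
  induction k with
  | zero => intro i _; simp
  | succ k ih =>
    intro i hk
    have h2 : 2 ≤ rlen l i := by omega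
    have hs := rlen_succ_of l i h2
    have := ih (i + 1) (by omega)
    rw [show i + (k + 1) = i + 1 + k from by omega, this]
    omega

theorem run_adj (l : List Char) (i k : Nat) (hk : k + 1 < rlen l i) :
    i + k + 1 < l.length ∧ l.getD (i + k + 1) ' ' = aFlip (l.getD (i + k) ' ') := by
  have h := run_at l k i (by omega)
  have h2 : 2 ≤ rlen l (i + k) := by omega
  exact (rlen_ge_two_iff l (i + k)).1 h2

theorem rlen_le (l : List Char) : ∀ i, i < l.length → i + rlen l i ≤ l.length := by
  intro i hi
  have h := run_at l (rlen l i - 1) i (by have := rlen_pos l i; omega)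
  have h2 : rlen l (i + (rlen l i - 1)) = 1 := by have := rlen_pos l i; omega
  by_cases hb : i + rlen l i ≤ l.length
  · exact hb
  · exfalso
    have hk : (rlen l i - 1) + 1 < rlen l i ∨ i + (rlen l i - 1) + 1 ≥ l.length := by omega
    rcases hk with hk | hk
    · omega
    · -- last chain element is already past: show contradiction via rlen_ge_two at some point
      -- use run_adj at k = rlen l i - 2 if rlen l i ≥ 2
      have hr := rlen_pos l i
      by_cases h1 : rlen l i = 1
      · omega
      · have hadj := run_adj l i (rlen l i - 2) (by omega)
        omega

theorem run_boundary (l : List Char) (i : Nat) (hi : i < l.length) (hb : i + rlen l i < l.length) :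
    ¬ (l.getD (i + rlen l i) ' ' = aFlip (l.getD (i + rlen l i - 1) ' ')) := by
  have hr := rlen_pos l i
  have h1 : rlen l (i + (rlen l i - 1)) = 1 := by
    have := run_at l (rlen l i - 1) i (by omega); omega
  intro hadj
  have h2 : 2 ≤ rlen l (i + (rlen l i - 1)) := by
    rw [rlen_ge_two_iff]
    constructor
    · omega
    · rw [show i + (rlen l i - 1) + 1 = i + rlen l i from by omega]
      rw [show i + (rlen l i - 1) = i + rlen l i - 1 from by omega]
      exact hadj
  omega

theorem aStep_eq (l : List Char) (st : Nat × List Char) (i : Nat) :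
    aStep l st i = if rlen l i > st.1
      then (rlen l i, (l.drop i).take (rlen l i)) else st := by
  simp only [aStep]
  rw [aInner_eq l (l.length - (i + 1)) (i + 1) _ 1 rfl]
  rw [show (1 + crun l (i + 1) (aFlip (l.getD i ' '))) = rlen l i from (rlen_eq_crun l (l.length - i) i rfl).symm]
  rw [PySem.List.slice_natCast_add]

theorem skipA (l : List Char) : ∀ d a (ml : Nat) (ms : List Char),
    (∀ j, a ≤ j → j < a + d → rlen l j ≤ ml) →
    (List.range' a d).foldl (aStep l) (ml, ms) = (ml, ms) := by
  intro d
  induction d with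
  | zero => intro a ml ms _; rfl
  | succ d ih =>
    intro a ml ms h
    rw [show List.range' a (d + 1) = a :: List.range' (a + 1) d from rfl]
    rw [List.foldl_cons, aStep_eq]
    rw [if_neg (by have := h a (by omega) (by omega); simp; omega)]
    exact ih (a + 1) ml ms (fun j h1 h2 => h j (by omega) (by omega))

theorem skipB (l : List Char) : ∀ d a (st : Nat × Nat × Nat),
    (∀ j, a ≤ j → j < a + d → l.getD j ' ' = aFlip (l.getD (j - 1) ' ')) →
    (List.range' a d).foldl (bStep l) st = st := by
  intro d
  induction d with
  | zero => intro a st _; rfl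
  | succ d ih =>
    intro a st h
    rw [show List.range' a (d + 1) = a :: List.range' (a + 1) d from rfl]
    rw [List.foldl_cons]
    rw [show bStep l st a = st from by
      unfold bStep
      rw [if_neg (by have := h a (by omega) (by omega); simp [aFlip] at this ⊢; exact this)]]
    exact ih (a + 1) st (fun j h1 h2 => h j (by omega) (by omega))

theorem A_run_fold (l : List Char) : ∀ d i bl bs, l.length - i = d →
    (List.range' i (l.length - i)).foldl (aStep l) (bl, (l.drop bs).take bl)
      = ((runBest l i bl bs).1, (l.drop (runBest l i bl bs).2).take (runBest l i bl bs).1) := by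
  intro d
  induction d using Nat.strong_induction_on with
  | _ d ih => ?_
  intro i bl bs hd
  by_cases hi : i < l.length
  · have hr1 := rlen_pos l i
    have hle := rlen_le l i hi
    have hrb : runBest l i bl bs = if rlen l i > bl then runBest l (i + rlen l i) (rlen l i) i
        else runBest l (i + rlen l i) bl bs := by
      rw [runBest, dif_pos hi]
    have hskip : ∀ (ml : Nat) (ms : List Char), rlen l i ≤ ml →
        (List.range' (i + 1) (rlen l i - 1)).foldl (aStep l) (ml, ms) = (ml, ms) := by
      intro ml ms hml
      apply skipA
      intro j h1 h2
      have := run_at l (j - i) i (by omega)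
      rw [show i + (j - i) = j from by omega] at this
      omega
    have hsplit : List.range' i (l.length - i)
        = i :: (List.range' (i + 1) (rlen l i - 1) ++ List.range' (i + rlen l i) (l.length - (i + rlen l i))) := by
      rw [show i + rlen l i = i + 1 + (rlen l i - 1) from by omega]
      rw [List.range'_append_1]
      rw [show rlen l i - 1 + (l.length - (i + 1 + (rlen l i - 1))) = l.length - i - 1 from by omega]
      rw [show l.length - i = (l.length - i - 1) + 1 from by omega]
      rfl
    rw [hsplit, List.foldl_cons, aStep_eq, List.foldl_append]
    by_cases hgt : rlen l i > bl
    · rw [if_pos hgt, hskip _ _ (le_refl _)]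
      have := ih (l.length - (i + rlen l i)) (by omega) (i + rlen l i) (rlen l i) i rfl
      rw [this, hrb, if_pos hgt]
    · rw [if_neg hgt, hskip _ _ (by omega)]
      have := ih (l.length - (i + rlen l i)) (by omega) (i + rlen l i) bl bs rfl
      rw [this, hrb, if_neg hgt]
  · rw [show l.length - i = 0 from by omega]
    rw [runBest, dif_neg hi]
    simp [List.range']

theorem B_run_fold (l : List Char) : ∀ d s bl bs (st : Nat × Nat × Nat), l.length - s = d → s < l.length →
    st = (List.range' (s + 1) (l.length - (s + 1))).foldl (bStep l) (bl, bs, s) →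
    (if l.length - st.2.2 > st.1 then (l.length - st.2.2, st.2.2) else (st.1, st.2.1))
      = runBest l s bl bs := by
  intro d
  induction d using Nat.strong_induction_on with
  | _ d ih => ?_
  intro s bl bs st hd hs hst
  have hr1 := rlen_pos l s
  have hle := rlen_le l s hs
  have hrb : runBest l s bl bs = if rlen l s > bl then runBest l (s + rlen l s) (rlen l s) s
      else runBest l (s + rlen l s) bl bs := by
    rw [runBest, dif_pos hs]
  have hskip : ∀ (st' : Nat × Nat × Nat),
      (List.range' (s + 1) (rlen l s - 1)).foldl (bStep l) st' = st' := by
    intro st'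
    apply skipB
    intro j h1 h2
    have := run_adj l s (j - s - 1) (by omega)
    rw [show s + (j - s - 1) + 1 = j from by omega, show s + (j - s - 1) = j - 1 from by omega] at this
    exact this.2
  by_cases hend : s + rlen l s = l.length
  · have hall : List.range' (s + 1) (l.length - (s + 1)) = List.range' (s + 1) (rlen l s - 1) := by
      rw [show l.length - (s + 1) = rlen l s - 1 from by omega]
    rw [hall, hskip] at hst
    subst hst
    rw [hrb]
    by_cases hgt : rlen l s > bl
    · rw [if_pos hgt, if_pos (by simp; omega), runBest, dif_neg (by omega)]
      simp only [Prod.mk.injEq]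
      exact ⟨by omega, trivial⟩
    · rw [if_neg hgt, if_neg (by simp; omega), runBest, dif_neg (by omega)]
  · have hblt : s + rlen l s < l.length := by omega
    have hbd := run_boundary l s hs hblt
    have hsplit : List.range' (s + 1) (l.length - (s + 1))
        = List.range' (s + 1) (rlen l s - 1)
          ++ ((s + rlen l s) :: List.range' (s + rlen l s + 1) (l.length - (s + rlen l s + 1))) := by
      rw [show ((s + rlen l s) :: List.range' (s + rlen l s + 1) (l.length - (s + rlen l s + 1)))
            = List.range' (s + rlen l s) ((l.length - (s + rlen l s + 1)) + 1) from rfl]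
      rw [show s + rlen l s = s + 1 + (rlen l s - 1) from by omega]
      rw [List.range'_append_1]
      rw [show rlen l s - 1 + (l.length - (s + 1 + (rlen l s - 1) + 1) + 1) = l.length - (s + 1) from by omega]
    have hstep : bStep l (bl, bs, s) (s + rlen l s)
        = (if rlen l s > bl then (rlen l s, s, s + rlen l s) else (bl, bs, s + rlen l s)) := by
      unfold bStep
      rw [if_pos (by simpa [aFlip] using hbd)]
      simp only [show s + rlen l s - s = rlen l s from by omega]
    rw [hsplit, List.foldl_append, hskip, List.foldl_cons, hstep] at hst
    rw [hrb]
    by_cases hgt : rlen l s > bl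
    · rw [if_pos hgt] at hst
      rw [if_pos hgt]
      exact ih (l.length - (s + rlen l s)) (by omega) (s + rlen l s) (rlen l s) s st rfl hblt
        (by rw [hst])
    · rw [if_neg hgt] at hst
      rw [if_neg hgt]
      exact ih (l.length - (s + rlen l s)) (by omega) (s + rlen l s) bl bs st rfl hblt
        (by rw [hst])

theorem solution_spec : Claim_equal_solution := by
  unfold Claim_equal_solution
  intro inp _
  show solution inp = solution_alt inp
  by_cases hn : inp.toList.length = 0
  · have hl : inp.toList = [] := List.eq_nil_of_length_eq_zero hn
    simp [solution, solution_alt, hl]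
  · have hn' : 0 < inp.toList.length := by omega
    have hA := A_run_fold inp.toList inp.toList.length 0 0 0 rfl
    simp only [Nat.sub_zero, List.drop_zero, List.take_zero] at hA
    have hB := B_run_fold inp.toList inp.toList.length 0 0 0
      ((List.range' (0 + 1) (inp.toList.length - (0 + 1))).foldl (bStep inp.toList) (0, 0, 0))
      rfl hn' rfl
    simp only [Nat.zero_add] at hB
    simp only [solution, solution_alt]
    rw [List.range_eq_range', hA, hB]
    rw [PySem.List.slice_natCast_add]
    by_cases h3 : (runBest inp.toList 0 0 0).1 < 3
    · rw [if_pos h3, if_neg (by omega)]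
    · rw [if_neg h3, if_pos (by omega)]
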